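-- pv_equiv track=rewrite | github.com/phootip/advent-of-code-2019 | 16/run-1.py | gen_pattern
-- ===== SOURCE A (Python) =====
-- def gen_pattern(base, digit, length):
--     new_pattern = []
--     while True:
--         for k in base:
--             for l in range(digit):
--                 new_pattern.append(k)
--                 if len(new_pattern) >= length + 1:
--                     new_pattern.pop(0)
--                     return new_pattern
-- ===== SOURCE B (Python) =====
-- def gen_pattern(base, digit, length):
--     # closed form: A's result element i is the periodic expansion at flat index i+1
--     return [base[((i + 1) // digit) % len(base)] for i in range(length)]
-- ===== Notes on version B (the rewrite author's own statement) =====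
-- stated objective: simpler
-- what changed: Replaces the grow-and-check while/for/for loop (with a final pop(0)) by a single comprehension that computes each element in closed form as base[((i+1)//digit) % len(base)].
import Mathlib
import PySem

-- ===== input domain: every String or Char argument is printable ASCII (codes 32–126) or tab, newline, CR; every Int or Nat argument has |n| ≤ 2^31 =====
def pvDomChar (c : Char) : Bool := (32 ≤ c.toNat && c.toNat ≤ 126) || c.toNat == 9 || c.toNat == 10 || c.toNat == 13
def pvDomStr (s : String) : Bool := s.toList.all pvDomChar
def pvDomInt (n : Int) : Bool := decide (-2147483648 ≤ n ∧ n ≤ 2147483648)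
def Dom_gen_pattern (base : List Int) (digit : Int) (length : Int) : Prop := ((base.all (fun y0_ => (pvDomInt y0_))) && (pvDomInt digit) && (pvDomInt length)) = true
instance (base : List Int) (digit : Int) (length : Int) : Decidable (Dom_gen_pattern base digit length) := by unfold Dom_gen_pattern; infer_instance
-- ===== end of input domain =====

-- B replaces A's grow-and-check loop by a single closed-form periodic-indexing comprehension (simpler, same cost).

-- ===== PORT A =====
-- inner 'for l in range(digit)': append k, check len >= length+1, pop(0) & return (Sum.inl = returned)
def pvA_inner (k : Int) (length : Int) : Nat → List Int → Sum (List Int) (List Int)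
  | 0, acc => Sum.inr acc
  | Nat.succ n, acc =>
      let acc' := acc ++ [k]
      if length + 1 ≤ (acc'.length : Int) then Sum.inl acc'.tail
      else pvA_inner k length n acc'

-- 'for k in base'
def pvA_outer (length : Int) (d : Nat) : List Int → List Int → Sum (List Int) (List Int)
  | [], acc => Sum.inr acc
  | k :: ks, acc =>
      match pvA_inner k length d acc with
      | Sum.inl r => Sum.inl r
      | Sum.inr acc' => pvA_outer length d ks acc'

-- 'while True': fuel is a totality guard only; under Pre_ each pass appends ≥ 1 element,
-- so fuel length.toNat + 2 is never exhausted before the return fires.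
def pvA_while (base : List Int) (d : Nat) (length : Int) : Nat → List Int → List Int
  | 0, acc => acc
  | Nat.succ f, acc =>
      match pvA_outer length d base acc with
      | Sum.inl r => r
      | Sum.inr acc' => pvA_while base d length f acc'

def gen_pattern (base : List Int) (digit : Int) (length : Int) : List Int :=
  pvA_while base digit.toNat length (length.toNat + 2) []

-- ===== PORT B =====
-- [base[((i + 1) // digit) % len(base)] for i in range(length)]
-- the index is always in range under Pre_ (0 ≤ idx < len base), so pyGetD's default is never used
def gen_pattern_alt (base : List Int) (digit : Int) (length : Int) : List Int :=
  (PySem.List.pyRange 0 length 1).map (fun i =>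
    PySem.List.pyGetD base (PySem.Int.mod (PySem.Int.floordiv (i + 1) digit) (base.length : Int)) 0)

-- ===== PRECONDITION & SPEC =====
-- On base = [] or digit ≤ 0 the Python A loops forever (never returns), so those inputs are excluded.
def Pre_gen_pattern (base : List Int) (digit : Int) (length : Int) : Prop :=
  base ≠ [] ∧ 1 ≤ digit
instance (base : List Int) (digit : Int) (length : Int) : Decidable (Pre_gen_pattern base digit length) := by
  unfold Pre_gen_pattern; infer_instance

def pvWitness_gen_pattern : List Int × Int × Int := ([0, 1, 0, -1], 2, 8)

def Spec_gen_pattern (base : List Int) (digit : Int) (length : Int) (out : List Int) : Prop := out = gen_pattern_alt base digit length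
instance (base : List Int) (digit : Int) (length : Int) (out : List Int) : Decidable (Spec_gen_pattern base digit length out) := by unfold Spec_gen_pattern; infer_instance

-- ===== CLAIM (what is proved, stated in full; the proofs are below) =====
def Claim_equal_gen_pattern : Prop := ∀ (base : List Int) (digit : Int) (length : Int), Dom_gen_pattern base digit length → Pre_gen_pattern base digit length → Spec_gen_pattern base digit length (gen_pattern base digit length)

-- ===== LEMMAS AND PROOFS =====

-- reference appender with a Nat threshold T = (length+1).toNat
def pvPush (T : Nat) : List Int → List Int → Sum (List Int) (List Int)
  | [], acc => Sum.inr acc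
  | x :: xs, acc =>
      if T ≤ acc.length + 1 then Sum.inl ((acc ++ [x]).tail)
      else pvPush T xs (acc ++ [x])

-- first n elements of the infinite cyclic repetition of s
def pvCyc (s : List Int) (n : Nat) : List Int :=
  (List.range n).map (fun j => s.getD (j % s.length) 0)

theorem pvA_inner_eq_push (k length : Int) (n : Nat) (acc : List Int) :
    pvA_inner k length n acc = pvPush (length + 1).toNat (List.replicate n k) acc := by
  induction n generalizing acc with
  | zero => simp [pvA_inner, pvPush]
  | succ m ih =>
      simp only [pvA_inner, List.replicate_succ, pvPush]
      by_cases hc : (length + 1).toNat ≤ acc.length + 1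
      · rw [if_pos hc, if_pos (by simp; omega)]
      · rw [if_neg hc, if_neg (by simp; omega), ih]

theorem pvPush_append (T : Nat) (xs ys acc : List Int) :
    pvPush T (xs ++ ys) acc =
      match pvPush T xs acc with
      | Sum.inl r => Sum.inl r
      | Sum.inr a => pvPush T ys a := by
  induction xs generalizing acc with
  | nil => simp [pvPush]
  | cons x xs ih =>
      simp only [List.cons_append, pvPush]
      split_ifs with h
      · rfl
      · exact ih (acc ++ [x])

theorem pvA_outer_eq_push (length : Int) (d : Nat) (ks acc : List Int) :
    pvA_outer length d ks acc =
      pvPush (length + 1).toNat (ks.flatMap (fun k => List.replicate d k)) acc := by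
  induction ks generalizing acc with
  | nil => simp [pvA_outer, pvPush]
  | cons k ks ih =>
      simp only [pvA_outer, List.flatMap_cons, pvPush_append, pvA_inner_eq_push]
      cases pvPush (length + 1).toNat (List.replicate d k) acc with
      | inl r => rfl
      | inr a => exact ih a

theorem pvPush_spec (T : Nat) (xs : List Int) : ∀ acc : List Int, acc.length < T →
    pvPush T xs acc =
      if acc.length + xs.length < T then Sum.inr (acc ++ xs)
      else Sum.inl ((acc ++ xs.take (T - acc.length)).tail) := by
  induction xs with
  | nil =>
      intro acc h
      simp only [pvPush, List.length_nil, Nat.add_zero]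
      rw [if_pos h, List.append_nil]
  | cons x xs ih =>
      intro acc h
      simp only [pvPush]
      by_cases h1 : T ≤ acc.length + 1
      · rw [if_pos h1, if_neg (by simp; omega)]
        have hT : T - acc.length = 1 := by omega
        simp [hT]
      · rw [if_neg h1, ih (acc ++ [x]) (by simp; omega)]
        by_cases h2 : acc.length + (x :: xs).length < T
        · rw [if_pos (by simp; simp at h2; omega), if_pos h2]
          simp
        · rw [if_neg (by simp; simp at h2; omega), if_neg h2]
          have hk : T - acc.length = (T - (acc ++ [x]).length) + 1 := by simp; omega
          rw [hk, List.take_succ_cons, List.append_assoc]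
          rfl

theorem pvCyc_small (s : List Int) (n : Nat) (h : n ≤ s.length) :
    pvCyc s n = s.take n := by
  apply List.ext_getElem
  · simp [pvCyc]; omega
  · intro i h1 h2
    simp only [pvCyc, List.length_map, List.length_range] at h1
    simp only [pvCyc, List.getElem_map, List.getElem_range, List.getElem_take]
    rw [Nat.mod_eq_of_lt (by omega), List.getD_eq_getElem _ _ (by omega)]

theorem pvCyc_peel (s : List Int) (n : Nat) (h : s.length ≤ n) :
    pvCyc s n = s ++ pvCyc s (n - s.length) := by
  apply List.ext_getElem
  · simp [pvCyc]; omega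
  · intro i h1 h2
    simp only [pvCyc, List.length_map, List.length_range] at h1
    simp only [pvCyc, List.getElem_map, List.getElem_range]
    by_cases hi : i < s.length
    · rw [List.getElem_append_left hi, Nat.mod_eq_of_lt hi,
        List.getD_eq_getElem _ _ hi]
    · rw [List.getElem_append_right (by omega)]
      simp only [pvCyc, List.getElem_map, List.getElem_range]
      rw [Nat.mod_eq_sub_mod (by omega)]

theorem pvA_while_spec (base : List Int) (d : Nat) (length : Int)
    (s : List Int) (hseq : s = base.flatMap (fun k => List.replicate d k))
    (f : Nat) : ∀ acc : List Int, acc.length < (length + 1).toNat →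
    (length + 1).toNat ≤ acc.length + f * s.length →
    pvA_while base d length f acc = (acc ++ pvCyc s ((length + 1).toNat - acc.length)).tail := by
  set T := (length + 1).toNat with hT
  induction f with
  | zero => intro acc h1 h2; omega
  | succ f ih =>
      intro acc h1 h2
      have hmul : (f + 1) * s.length = f * s.length + s.length := Nat.succ_mul f s.length
      simp only [pvA_while, pvA_outer_eq_push, ← hseq, ← hT]
      rw [pvPush_spec T s acc h1]
      by_cases hc : acc.length + s.length < T
      · rw [if_pos hc]
        show pvA_while base d length f (acc ++ s) = _
        rw [ih (acc ++ s) (by simp; omega) (by simp; omega)]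
        rw [pvCyc_peel s (T - acc.length) (by omega)]
        have heq : T - (acc ++ s).length = T - acc.length - s.length := by simp; omega
        rw [heq, List.append_assoc]
      · rw [if_neg hc]
        show (acc ++ List.take (T - acc.length) s).tail = _
        rw [pvCyc_small s (T - acc.length) (by omega)]

theorem pvFlat_length (base : List Int) (d : Nat) :
    (base.flatMap (fun k => List.replicate d k)).length = base.length * d := by
  induction base with
  | nil => simp
  | cons k ks ih => simp [ih]; ring

theorem pvFlat_getD (base : List Int) (d : Nat) (hd : 0 < d) : ∀ m : Nat, m < base.length * d →
    (base.flatMap (fun k => List.replicate d k)).getD m 0 = base.getD (m / d) 0 := by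
  induction base with
  | nil => simp
  | cons k ks ih =>
      intro m hm
      simp only [List.length_cons] at hm
      have hmul : (ks.length + 1) * d = ks.length * d + d := Nat.succ_mul ks.length d
      simp only [List.flatMap_cons]
      by_cases h : m < d
      · rw [List.getD_eq_getElem?_getD, List.getElem?_append_left (by simpa using h),
          ← List.getD_eq_getElem?_getD]
        simp [Nat.div_eq_of_lt h, List.getD_eq_getElem?_getD, h]
      · rw [List.getD_eq_getElem?_getD, List.getElem?_append_right (by simpa using h),
          List.length_replicate, ← List.getD_eq_getElem?_getD]
        rw [hmul] at hm
        have hdiv : m / d = (m - d) / d + 1 := Nat.div_eq_sub_div hd (by omega)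
        rw [ih (m - d) (by omega), hdiv]
        simp

theorem pvCyc_elem (base : List Int) (d : Nat) (hd : 0 < d) (hb : base ≠ []) (m : Nat) :
    (base.flatMap (fun k => List.replicate d k)).getD
        (m % (base.flatMap (fun k => List.replicate d k)).length) 0
      = base.getD (m / d % base.length) 0 := by
  rw [pvFlat_length]
  have hbl : 0 < base.length := List.length_pos_of_ne_nil hb
  have hpos : 0 < base.length * d := Nat.mul_pos hbl hd
  rw [pvFlat_getD base d hd _ (Nat.mod_lt _ hpos)]
  congr 1
  rw [mul_comm, Nat.mod_mul_right_div_self]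

theorem pvAlt_eq (base : List Int) (digit : Int) (length : Int)
    (hd : 1 ≤ digit) (hl : 0 ≤ length) :
    gen_pattern_alt base digit length =
      (List.range length.toNat).map
        (fun k => base.getD ((k + 1) / digit.toNat % base.length) 0) := by
  unfold gen_pattern_alt
  rw [PySem.List.pyRange_one, List.map_map]
  have hlen : (length - 0).toNat = length.toNat := by omega
  rw [hlen]
  apply List.map_congr_left
  intro k _
  simp only [Function.comp]
  have h1 : ((0 : Int) + k) + 1 = ((k + 1 : Nat) : Int) := by push_cast; ring
  have h2 : digit = ((digit.toNat : Nat) : Int) := by omega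
  rw [h1]
  conv_lhs => rw [h2]
  rw [PySem.Int.floordiv_natCast, PySem.Int.mod_natCast, PySem.List.pyGetD_natCast]

-- ===== VERDICT (by name: the statement is the Claim_ definition above) =====
theorem gen_pattern_spec : Claim_equal_gen_pattern := by
  intro base digit length _ hpre
  obtain ⟨hb, hd⟩ := hpre
  unfold Spec_gen_pattern
  have hd0 : 0 < digit.toNat := by omega
  have hsl : (base.flatMap (fun k => List.replicate digit.toNat k)).length
      = base.length * digit.toNat := pvFlat_length base digit.toNat
  have hbl : 0 < base.length := List.length_pos_of_ne_nil hb
  have hs1 : 1 ≤ (base.flatMap (fun k => List.replicate digit.toNat k)).length := by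
    rw [hsl]; exact Nat.mul_pos hbl hd0
  by_cases hl : 0 ≤ length
  · -- main case: T = length.toNat + 1 ≥ 1
    have hT : (length + 1).toNat = length.toNat + 1 := by omega
    have h1 : ([] : List Int).length < (length + 1).toNat := by simp; omega
    have h2 : (length + 1).toNat ≤ ([] : List Int).length
        + (length.toNat + 2) * (base.flatMap (fun k => List.replicate digit.toNat k)).length := by
      have h3 : (length.toNat + 2) * 1
          ≤ (length.toNat + 2) * (base.flatMap (fun k => List.replicate digit.toNat k)).length :=
        Nat.mul_le_mul_left _ hs1
      simp only [Nat.mul_one] at h3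
      simp only [List.length_nil, Nat.zero_add]
      omega
    unfold gen_pattern
    rw [pvA_while_spec base digit.toNat length _ rfl _ [] h1 h2]
    simp only [List.nil_append, List.length_nil, Nat.sub_zero, hT]
    rw [pvAlt_eq base digit length hd hl]
    rw [pvCyc, List.range_succ_eq_map, List.map_cons, List.tail_cons, List.map_map]
    apply List.map_congr_left
    intro k _
    simp only [Function.comp]
    have hce := pvCyc_elem base digit.toNat hd0 hb (k + 1)
    simpa [Nat.succ_eq_add_one] using hce
  · -- length < 0: A returns [] (first append triggers the pop-and-return), B's range is empty
    have halt : gen_pattern_alt base digit length = [] := by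
      unfold gen_pattern_alt
      rw [PySem.List.pyRange_one_eq_nil (by omega)]
      rfl
    rw [halt]
    have hs : base.flatMap (fun k => List.replicate digit.toNat k) ≠ [] := by
      intro h
      rw [h] at hs1
      simp at hs1
    obtain ⟨x, xs, hsx⟩ := List.exists_cons_of_ne_nil hs
    have hTz : (length + 1).toNat = 0 := by omega
    have hltn : length.toNat = 0 := by omega
    unfold gen_pattern
    rw [hltn]
    simp only [pvA_while, pvA_outer_eq_push, hsx, pvPush, hTz]
    simp
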